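-- pv_equiv track=rewrite | github.com/vigneshsabapathi/python-algorithms | sorts/stalin_sort_optimized.py | stalin_sort_counted
-- ===== SOURCE A (Python) =====
-- def stalin_sort_counted(sequence: list) -> tuple[list, int]:
--     """Returns (sorted result, number of purged elements).
--
--     >>> stalin_sort_counted([4, 3, 5, 2, 1, 7])
--     ([4, 5, 7], 3)
--     >>> stalin_sort_counted([1, 2, 3])
--     ([1, 2, 3], 0)
--     >>> stalin_sort_counted([])
--     ([], 0)
--     """
--     if not sequence:
--         return [], 0
--     result = [sequence[0]]
--     purged = 0
--     for element in sequence[1:]: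
--         if element >= result[-1]:
--             result.append(element)
--         else:
--             purged += 1
--     return result, purged
-- ===== SOURCE B (Python) =====
-- def stalin_sort_counted(sequence: list) -> tuple[list, int]:
--     """Prefix-maxima reformulation: an element survives Stalin sort iff it
--     equals the inclusive running maximum of the sequence up to it."""
--     if not sequence:
--         return [], 0
--     maxima = []
--     m = sequence[0]
--     for x in sequence:
--         m = m if m >= x else x
--         maxima.append(m)
--     result = [x for x, m in zip(sequence, maxima) if x == m]
--     return result, len(sequence) - len(result)
-- ===== Notes on version B (the rewrite author's own statement) =====
-- stated objective: alternative
-- what changed: Replaces the last-kept-element-plus-purge-counter loop by a table-then-filter decomposition: build the prefix-maxima sequence, keep exactly the elements equal to their inclusive running maximum, and derive the purge count as a length difference.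
import Mathlib
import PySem

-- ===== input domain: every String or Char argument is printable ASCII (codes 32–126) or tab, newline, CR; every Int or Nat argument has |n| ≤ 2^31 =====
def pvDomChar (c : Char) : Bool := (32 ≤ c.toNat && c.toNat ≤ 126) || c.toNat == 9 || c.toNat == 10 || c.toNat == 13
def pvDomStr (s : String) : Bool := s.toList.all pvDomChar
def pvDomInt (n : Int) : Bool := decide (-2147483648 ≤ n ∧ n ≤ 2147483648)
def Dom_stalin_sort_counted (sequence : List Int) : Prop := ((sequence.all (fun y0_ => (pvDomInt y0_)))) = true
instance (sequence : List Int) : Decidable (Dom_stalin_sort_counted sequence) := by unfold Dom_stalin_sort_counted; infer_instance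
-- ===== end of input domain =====

-- B replaces A's last-kept/purge-counter loop by a prefix-maxima table plus an equality filter (alternative decomposition, same cost).


-- ===== PORT A =====
-- loop body of A: state = (result, purged); result is always nonempty, result[-1] = getLastD
def stepA (st : List Int × Int) (element : Int) : List Int × Int :=
  if element ≥ st.1.getLastD 0 then (st.1 ++ [element], st.2) else (st.1, st.2 + 1)

def stalin_sort_counted (sequence : List Int) : List Int × Int :=
  match sequence with
  | [] => ([], 0)
  | h :: t =>
    let st := t.foldl stepA ([h], 0)
    (st.1, st.2)

-- ===== PORT B =====
-- loop body of B: state = (maxima, m)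
def stepB (st : List Int × Int) (x : Int) : List Int × Int :=
  let m := if st.2 ≥ x then st.2 else x
  (st.1 ++ [m], m)

def stalin_sort_counted_alt (sequence : List Int) : List Int × Int :=
  match sequence with
  | [] => ([], 0)
  | h :: _ =>
    let maxima := (sequence.foldl stepB ([], h)).1
    let result := (sequence.zip maxima).filterMap (fun p => if p.1 = p.2 then some p.1 else none)
    (result, (sequence.length : Int) - (result.length : Int))

-- ===== PRECONDITION & SPEC =====
def Spec_stalin_sort_counted (sequence : List Int) (out : List Int × Int) : Prop := out = stalin_sort_counted_alt sequence
instance (sequence : List Int) (out : List Int × Int) : Decidable (Spec_stalin_sort_counted sequence out) := by unfold Spec_stalin_sort_counted; infer_instance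

-- ===== CLAIM (what is proved, stated in full; the proofs are below) =====
def Claim_equal_stalin_sort_counted : Prop := ∀ (sequence : List Int), Dom_stalin_sort_counted sequence → Spec_stalin_sort_counted sequence (stalin_sort_counted sequence)

-- ===== LEMMAS AND PROOFS =====

-- the kept suffix given last-kept element c
def keepA (c : Int) : List Int → List Int
  | [] => []
  | x :: xs => if x ≥ c then x :: keepA x xs else keepA c xs

-- the purge count given last-kept element c
def purgeA (c : Int) : List Int → Int
  | [] => 0
  | x :: xs => if x ≥ c then purgeA x xs else purgeA c xs + 1

-- the tail of B's prefix-maxima table given current maximum c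
def maxFrom (c : Int) : List Int → List Int
  | [] => []
  | x :: xs => (if c ≥ x then c else x) :: maxFrom (if c ≥ x then c else x) xs

lemma foldA (t : List Int) : ∀ (res : List Int) (p : Int), res ≠ [] →
    t.foldl stepA (res, p) = (res ++ keepA (res.getLastD 0) t, p + purgeA (res.getLastD 0) t) := by
  induction t with
  | nil => intro res p _; simp [keepA, purgeA]
  | cons x xs ih =>
    intro res p hne
    simp only [List.foldl_cons, stepA]
    by_cases hx : x ≥ res.getLastD 0
    · rw [if_pos hx]
      rw [ih (res ++ [x]) p (by simp)]
      rw [List.getLastD_concat]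
      have hk : keepA (res.getLastD 0) (x :: xs) = x :: keepA x xs := by
        simp only [keepA]; rw [if_pos hx]
      have hp : purgeA (res.getLastD 0) (x :: xs) = purgeA x xs := by
        simp only [purgeA]; rw [if_pos hx]
      rw [hk, hp]
      simp
    · rw [if_neg hx]
      rw [ih res (p + 1) hne]
      have hk : keepA (res.getLastD 0) (x :: xs) = keepA (res.getLastD 0) xs := by
        simp only [keepA]; rw [if_neg hx]
      have hp : purgeA (res.getLastD 0) (x :: xs) = purgeA (res.getLastD 0) xs + 1 := by
        simp only [purgeA]; rw [if_neg hx]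
      rw [hk, hp]
      simp only [Prod.mk.injEq]
      exact ⟨trivial, by ring⟩

lemma foldB (t : List Int) : ∀ (acc : List Int) (c : Int),
    (t.foldl stepB (acc, c)).1 = acc ++ maxFrom c t := by
  induction t with
  | nil => intro acc c; simp [maxFrom]
  | cons x xs ih =>
    intro acc c
    simp only [List.foldl_cons, stepB, maxFrom]
    rw [ih]
    simp

lemma zipFilter (t : List Int) : ∀ (c : Int),
    ((t.zip (maxFrom c t)).filterMap (fun p => if p.1 = p.2 then some p.1 else none)) = keepA c t := by
  induction t with
  | nil => intro c; simp [maxFrom, keepA]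
  | cons x xs ih =>
    intro c
    simp only [maxFrom, keepA, List.zip_cons_cons, List.filterMap_cons]
    by_cases hx : x ≥ c
    · by_cases hc : c ≥ x
      · have : x = c := le_antisymm hc hx
        subst this
        simp [ih]
      · rw [if_neg hc]
        simp [hx, ih]
    · have hc : c ≥ x := le_of_not_ge hx
      rw [if_pos hc]
      have hne : ¬ (x = c) := by
        intro h; exact hx (le_of_eq h.symm)
      simp [hx, hne, ih]

lemma purge_eq_len (t : List Int) : ∀ (c : Int),
    purgeA c t = (t.length : Int) - ((keepA c t).length : Int) := by
  induction t with
  | nil => intro c; simp [purgeA, keepA]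
  | cons x xs ih =>
    intro c
    simp only [purgeA, keepA, List.length_cons]
    by_cases hx : x ≥ c
    · simp only [if_pos hx, ih x, List.length_cons]
      push_cast; ring
    · simp only [if_neg hx, ih c]
      push_cast; ring

-- ===== VERDICT (by name: the statement is the Claim_ definition above) =====
theorem stalin_sort_counted_spec : Claim_equal_stalin_sort_counted := by
  intro sequence _
  unfold Spec_stalin_sort_counted
  match sequence with
  | [] => rfl
  | h :: t =>
    simp only [stalin_sort_counted, stalin_sort_counted_alt]
    rw [foldA t [h] 0 (by simp)]
    have hmax : ((h :: t).foldl stepB ([], h)).1 = maxFrom h (h :: t) := by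
      rw [foldB]; rfl
    rw [hmax]
    have hm : maxFrom h (h :: t) = h :: maxFrom h t := by
      simp [maxFrom]
    rw [hm]
    have hres : List.filterMap (fun p => if p.1 = p.2 then some p.1 else none)
        ((h :: t).zip (h :: maxFrom h t)) = h :: keepA h t := by
      simp only [List.zip_cons_cons, List.filterMap_cons]
      rw [zipFilter t h]
      simp
    rw [hres]
    have hgl : ([h] : List Int).getLastD 0 = h := rfl
    rw [hgl, purge_eq_len]
    simp only [Prod.mk.injEq, List.cons_append, List.nil_append, List.length_cons]
    refine ⟨trivial, ?_⟩
    push_cast; ring
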